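-- pv_equiv track=rewrite | github.com/misaka0502/LIBERO | scripts/create_pcd_dataset.py | _typed_section_pairs
-- ===== SOURCE A (Python) =====
-- def _typed_section_pairs(section, default_category):
--     pairs = []
--     pending = []
--     idx = 1
--     while idx < len(section):
--         token = section[idx]
--         if token == "-":
--             idx += 1
--             if idx >= len(section):
--                 raise RuntimeError("Malformed typed BDDL section: '-' without category.")
--             category = str(section[idx])
--             pairs.extend((str(name), category) for name in pending)
--             pending = []
--         else:
--             pending.append(str(token))
--         idx += 1
--     pairs.extend((str(name), str(default_category)) for name in pending)
--     return pairs
-- ===== SOURCE B (Python) =====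
-- def _typed_section_pairs(section, default_category):
--     # Split the tokens after the section head into dash-delimited segments:
--     # each run of names is closed by the token following its '-' marker.
--     tokens = section[1:]
--     pairs = []
--     while True:
--         try:
--             d = tokens.index("-")
--         except ValueError:
--             pairs += [(str(name), str(default_category)) for name in tokens]
--             return pairs
--         if d + 1 >= len(tokens):
--             raise RuntimeError("Malformed typed BDDL section: '-' without category.")
--         category = str(tokens[d + 1])
--         pairs += [(str(name), category) for name in tokens[:d]]
--         tokens = tokens[d + 2:]
-- ===== Notes on version B (the rewrite author's own statement) =====
-- stated objective: alternative
-- what changed: A scans token by token with a mutable pending-names accumulator flushed at each '-'; B instead splits the token list into dash-delimited segments (tokens[:d], category tokens[d+1], rest tokens[d+2:]) and emits each segment's pairs at once, with leftover names taking default_category.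
import Mathlib
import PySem

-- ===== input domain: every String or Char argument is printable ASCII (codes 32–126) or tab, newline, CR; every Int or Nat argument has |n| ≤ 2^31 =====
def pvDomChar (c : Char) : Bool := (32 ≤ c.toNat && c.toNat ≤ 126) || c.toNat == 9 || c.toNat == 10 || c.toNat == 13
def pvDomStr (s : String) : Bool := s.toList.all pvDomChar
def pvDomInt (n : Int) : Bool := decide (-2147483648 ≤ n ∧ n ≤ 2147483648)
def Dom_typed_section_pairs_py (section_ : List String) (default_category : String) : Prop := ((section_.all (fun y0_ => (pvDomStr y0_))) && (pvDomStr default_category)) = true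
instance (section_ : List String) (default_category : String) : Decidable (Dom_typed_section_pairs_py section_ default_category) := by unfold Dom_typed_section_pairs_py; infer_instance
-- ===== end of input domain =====

-- B re-implements A's token-by-token scan (pending-accumulator) as a split into dash-delimited
-- segments; same return value wherever A returns (Pre_ excludes the RuntimeError inputs, where B raises too).

-- ===== PORT A =====
-- while-loop over idx with `pending` accumulator; str() on a str is the identity.
def pvAGo (rest : List String) (pairs : List (String × String)) (pending : List String)
    (dc : String) : List (String × String) :=
  match rest with
  | [] => pairs ++ pending.map (fun n => (n, dc))
  | token :: rest' =>
    if token = "-" then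
      match rest' with
      | [] => []   -- Python A raises RuntimeError here; excluded by Pre_
      | cat :: rest'' => pvAGo rest'' (pairs ++ pending.map (fun n => (n, cat))) [] dc
    else pvAGo rest' pairs (pending ++ [token]) dc

def typed_section_pairs_py (section_ : List String) (default_category : String) :
    List (String × String) :=
  pvAGo (section_.drop 1) [] [] default_category

-- ===== PORT B =====
-- split the remaining tokens at the first '-' (tokens[:d] / tokens[d+1] / tokens[d+2:]).
def pvBGo (tokens : List String) (pairs : List (String × String)) (dc : String) :
    List (String × String) :=
  match h : tokens.dropWhile (fun t => t != "-") with
  | [] => pairs ++ (tokens.takeWhile (fun t => t != "-")).map (fun n => (n, dc))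
  | [_] => []   -- Python B raises RuntimeError here; excluded by Pre_
  | _ :: cat :: rest =>
      pvBGo rest (pairs ++ (tokens.takeWhile (fun t => t != "-")).map (fun n => (n, cat))) dc
termination_by tokens.length
decreasing_by
  have := List.length_dropWhile_le (fun t => t != "-") tokens
  rw [h] at this; simp at this; omega

def typed_section_pairs_py_alt (section_ : List String) (default_category : String) :
    List (String × String) :=
  pvBGo (section_.drop 1) [] default_category

-- ===== PRECONDITION & SPEC =====
-- length of the trailing run of "-" tokens
def pvTrail : List String → Nat
  | [] => 0
  | t :: rest => if t = "-" ∧ pvTrail rest = rest.length then pvTrail rest + 1 else pvTrail rest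

-- Pre_ excludes exactly the malformed sections (trailing '-'-run of odd length after the head),
-- on which Python A raises RuntimeError (and Python B raises the same RuntimeError).
def Pre_typed_section_pairs_py (section_ : List String) (default_category : String) : Prop :=
  pvTrail (section_.drop 1) % 2 = 0
instance (section_ : List String) (default_category : String) :
    Decidable (Pre_typed_section_pairs_py section_ default_category) := by
  unfold Pre_typed_section_pairs_py; infer_instance

def pvWitness_typed_section_pairs_py : List String × String :=
  (["objects", "a", "b", "-", "cat", "c"], "default")

def Spec_typed_section_pairs_py (section_ : List String) (default_category : String)
    (out : List (String × String)) : Prop :=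
  out = typed_section_pairs_py_alt section_ default_category
instance (section_ : List String) (default_category : String) (out : List (String × String)) :
    Decidable (Spec_typed_section_pairs_py section_ default_category out) := by
  unfold Spec_typed_section_pairs_py; infer_instance

-- ===== CLAIM (what is proved, stated in full; the proofs are below) =====
def Claim_equal_typed_section_pairs_py : Prop := ∀ (section_ : List String) (default_category : String), Dom_typed_section_pairs_py section_ default_category → Pre_typed_section_pairs_py section_ default_category → Spec_typed_section_pairs_py section_ default_category (typed_section_pairs_py section_ default_category)

-- ===== LEMMAS AND PROOFS =====

lemma pvTrail_le (l : List String) : pvTrail l ≤ l.length := by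
  induction l with
  | nil => simp [pvTrail]
  | cons t rest ih => simp only [pvTrail, List.length_cons]; split <;> omega

lemma takeWhile_append_all {p : String → Bool} {l1 l2 : List String}
    (h : ∀ x ∈ l1, p x = true) :
    (l1 ++ l2).takeWhile p = l1 ++ l2.takeWhile p := by
  induction l1 with
  | nil => simp
  | cons a l ih =>
      simp [h a (by simp), ih (fun x hx => h x (by simp [hx]))]

lemma dropWhile_append_all {p : String → Bool} {l1 l2 : List String}
    (h : ∀ x ∈ l1, p x = true) :
    (l1 ++ l2).dropWhile p = l2.dropWhile p := by
  induction l1 with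
  | nil => simp
  | cons a l ih =>
      simp only [List.cons_append, List.dropWhile_cons, h a (by simp), if_true,
        ih (fun x hx => h x (by simp [hx]))]

lemma pv_key (n : Nat) : ∀ (toks : List String), toks.length ≤ n →
    ∀ (pairs : List (String × String)) (pending : List String) (dc : String),
    (∀ x ∈ pending, (x != "-") = true) → pvTrail toks % 2 = 0 →
    pvAGo toks pairs pending dc = pvBGo (pending ++ toks) pairs dc := by
  induction n with
  | zero =>
      intro toks hlen pairs pending dc hp _
      have : toks = [] := List.length_eq_zero_iff.mp (Nat.le_zero.mp hlen)
      subst this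
      rw [pvBGo]
      rw [dropWhile_append_all hp, takeWhile_append_all hp]
      simp [pvAGo]
  | succ n ih =>
      intro toks hlen pairs pending dc hp htr
      match toks with
      | [] =>
          rw [pvBGo]
          rw [dropWhile_append_all hp, takeWhile_append_all hp]
          simp [pvAGo]
      | token :: rest =>
          by_cases hd : token = "-"
          · subst hd
            match rest with
            | [] =>
                exfalso
                simp [pvTrail] at htr
            | cat :: rest'' =>
                -- trailing-run parity descends to rest''
                have htr'' : pvTrail rest'' % 2 = 0 := by
                  have h1 := pvTrail_le rest''
                  simp only [pvTrail, List.length_cons] at htr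
                  split_ifs at htr <;> simp_all <;> omega
                have hrec := ih rest'' (by simp at hlen; omega)
                  (pairs ++ pending.map (fun n => (n, cat))) [] dc (by simp) htr''
                simp only [List.nil_append] at hrec
                have hrhs : pvBGo (pending ++ "-" :: cat :: rest'') pairs dc
                    = pvBGo rest'' (pairs ++ pending.map (fun n => (n, cat))) dc := by
                  rw [pvBGo, dropWhile_append_all hp, takeWhile_append_all hp]
                  rw [show List.dropWhile (fun x => x != "-") ("-" :: cat :: rest'') = "-" :: cat :: rest'' from by simp]
                  simp
                rw [hrhs]
                simpa [pvAGo] using hrec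
          · have htr' : pvTrail rest % 2 = 0 := by
              have h1 := pvTrail_le rest
              simp only [pvTrail] at htr
              split_ifs at htr with hc
              · exact absurd hc.1 hd
              · exact htr
            have hp' : ∀ x ∈ pending ++ [token], (x != "-") = true := by
              intro x hx
              rcases List.mem_append.mp hx with h | h
              · exact hp x h
              · simp at h; subst h; simp [hd]
            have hrec := ih rest (by simp at hlen; omega) pairs (pending ++ [token]) dc hp' htr'
            have hstep : pvAGo (token :: rest) pairs pending dc
                = pvAGo rest pairs (pending ++ [token]) dc := by
              rw [pvAGo.eq_def]; simp [hd]
            rw [hstep, hrec, List.append_assoc, List.singleton_append]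

-- ===== VERDICT (by name: the statement is the Claim_ definition above) =====
theorem typed_section_pairs_py_spec : Claim_equal_typed_section_pairs_py := by
  intro section_ default_category _ hpre
  unfold Spec_typed_section_pairs_py typed_section_pairs_py typed_section_pairs_py_alt
  exact pv_key (section_.drop 1).length (section_.drop 1) le_rfl [] [] default_category
    (by simp) hpre
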